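-- pv_equiv track=rewrite | github.com/JanLahmann/doQumentation | translation/scripts/validate-translation.py | count_latex_display
-- ===== SOURCE A (Python) =====
-- def count_latex_display(content: str) -> int:
--     """Count display math blocks (lines with standalone $$)."""
--     count = 0
--     in_code = False
--     for line in content.split('\n'):
--         if line.strip().startswith('```'):
--             in_code = not in_code
--             continue
--         if in_code:
--             continue
--         if line.strip() == '$$':
--             count += 1
--     return count
-- ===== SOURCE B (Python) =====
-- def count_latex_display(content: str) -> int:
--     """Count display math blocks (lines with standalone $$)."""
--     # Partition lines into segments cut at fence lines (fences discarded);
--     # segments at even positions (0, 2, 4, ...) are outside code blocks.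
--     segments = []
--     cur = []
--     for line in content.split('\n'):
--         if line.strip().startswith('```'):
--             segments.append(cur)
--             cur = []
--         else:
--             cur.append(line)
--     segments.append(cur)
--     total = 0
--     while segments:
--         total += sum(1 for line in segments[0] if line.strip() == '$$')
--         segments = segments[2:]
--     return total
-- ===== Notes on version B (the rewrite author's own statement) =====
-- stated objective: alternative
-- what changed: Replaces the interleaved stateful scan (count + in_code toggle per line) by partition-then-count: one pass cuts the lines into segments at fence lines, then the standalone $$ lines are summed over the even-indexed (non-code) segments only.
import Mathlib
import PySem

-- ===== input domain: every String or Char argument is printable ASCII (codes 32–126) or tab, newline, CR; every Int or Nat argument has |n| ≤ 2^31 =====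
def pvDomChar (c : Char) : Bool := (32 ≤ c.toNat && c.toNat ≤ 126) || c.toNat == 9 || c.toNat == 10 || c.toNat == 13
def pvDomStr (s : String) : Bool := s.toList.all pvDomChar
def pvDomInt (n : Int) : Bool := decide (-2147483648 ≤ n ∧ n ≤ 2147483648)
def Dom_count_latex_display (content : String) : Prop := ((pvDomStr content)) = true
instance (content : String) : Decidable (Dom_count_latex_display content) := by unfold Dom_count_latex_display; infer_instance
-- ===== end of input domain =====

-- B changes the decomposition: A is one interleaved scan toggling an in-code flag; B first
-- partitions the lines into segments cut at fence lines, then counts '$$' lines in the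
-- even-indexed (non-code) segments. Same asymptotic cost; objective: alternative.

-- ===== PORT A =====
def count_latex_display (content : String) : Int :=
  ((PySem.Chars.splitOn content.toList ['\n']).foldl
    (fun (st : Int × Bool) line =>
      if PySem.Chars.startswith (PySem.Chars.strip line) ['`', '`', '`'] then (st.1, !st.2)
      else if st.2 then st
      else if PySem.Chars.strip line == ['$', '$'] then (st.1 + 1, st.2)
      else st)
    (0, false)).1

-- ===== PORT B =====
-- second phase of Source B: 'while segments: total += #$$-lines of segments[0]; segments = segments[2:]'
def pvSumEvens : List (List (List Char)) → Int
  | [] => 0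
  | seg :: rest =>
      ((seg.filter (fun line => PySem.Chars.strip line == ['$', '$'])).length : Int)
        + pvSumEvens (rest.drop 1)
termination_by segs => segs.length
decreasing_by simp only [List.length_drop, List.length_cons]; omega

def count_latex_display_alt (content : String) : Int :=
  let st := (PySem.Chars.splitOn content.toList ['\n']).foldl
    (fun (st : List (List (List Char)) × List (List Char)) line =>
      if PySem.Chars.startswith (PySem.Chars.strip line) ['`', '`', '`'] then (st.1 ++ [st.2], [])
      else (st.1, st.2 ++ [line]))
    ([], [])
  pvSumEvens (st.1 ++ [st.2])

-- ===== PRECONDITION & SPEC =====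
def Spec_count_latex_display (content : String) (out : Int) : Prop := out = count_latex_display_alt content
instance (content : String) (out : Int) : Decidable (Spec_count_latex_display content out) := by unfold Spec_count_latex_display; infer_instance

-- ===== CLAIM (what is proved, stated in full; the proofs are below) =====
def Claim_equal_count_latex_display : Prop := ∀ (content : String), Dom_count_latex_display content → Spec_count_latex_display content (count_latex_display content)

-- ===== LEMMAS AND PROOFS =====

-- count that A's scan adds when started with flag b (the count component factored out)
def pvACount : List (List Char) → Bool → Int
  | [], _ => 0
  | line :: ls, b =>
      if PySem.Chars.startswith (PySem.Chars.strip line) ['`', '`', '`'] then pvACount ls (!b)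
      else if b then pvACount ls b
      else if PySem.Chars.strip line == ['$', '$'] then pvACount ls b + 1
      else pvACount ls b

def pvSegCount (seg : List (List Char)) : Int :=
  ((seg.filter (fun line => PySem.Chars.strip line == ['$', '$'])).length : Int)

lemma pvAfold_eq (ls : List (List Char)) : ∀ (c : Int) (b : Bool),
    (ls.foldl (fun (st : Int × Bool) line =>
      if PySem.Chars.startswith (PySem.Chars.strip line) ['`', '`', '`'] then (st.1, !st.2)
      else if st.2 then st
      else if PySem.Chars.strip line == ['$', '$'] then (st.1 + 1, st.2)
      else st) (c, b)).1 = c + pvACount ls b := by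
  induction ls with
  | nil => intro c b; simp [pvACount]
  | cons l ls ih =>
      intro c b
      by_cases hf : PySem.Chars.startswith (PySem.Chars.strip l) ['`', '`', '`'] = true
      · simp only [List.foldl_cons, pvACount, hf, if_pos, ih]
      · by_cases hb : b
        · subst hb
          simp only [List.foldl_cons, pvACount, hf, if_pos, if_neg,
            Bool.false_eq_true, not_false_iff, ih]
        · simp only [Bool.not_eq_true] at hb
          subst hb
          by_cases hm : (PySem.Chars.strip l == ['$', '$']) = true
          · simp only [List.foldl_cons, pvACount, hf, hm, Bool.false_eq_true, ite_false,
              ite_true, ih]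
            ring
          · simp only [List.foldl_cons, pvACount, hf, hm, Bool.false_eq_true, ite_false, ih]

lemma pvSumEvens_append_singleton : ∀ (segs : List (List (List Char))) (y : List (List Char)),
    pvSumEvens (segs ++ [y])
      = pvSumEvens segs + (if segs.length % 2 = 0 then pvSegCount y else 0) := by
  intro segs
  induction segs using pvSumEvens.induct with
  | case1 => intro y; simp [pvSumEvens, pvSegCount]
  | case2 s rest ih =>
      intro y
      cases rest with
      | nil => simp [pvSumEvens]
      | cons t ts =>
          simp only [List.cons_append, pvSumEvens, List.drop_succ_cons, List.drop_zero] at *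
          rw [ih y]
          by_cases hp : ts.length % 2 = 0
          · have hq : (s :: t :: ts).length % 2 = 0 := by
              simp only [List.length_cons]; omega
            simp only [hp, hq, ite_true]; ring
          · have hq : ¬ (s :: t :: ts).length % 2 = 0 := by
              simp only [List.length_cons]; omega
            simp only [hp, hq, ite_false]; ring

lemma pvMain (ls : List (List Char)) :
    ∀ (segs : List (List (List Char))) (cur : List (List Char)),
    pvSumEvens
      ((ls.foldl (fun (st : List (List (List Char)) × List (List Char)) line =>
          if PySem.Chars.startswith (PySem.Chars.strip line) ['`', '`', '`'] then (st.1 ++ [st.2], [])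
          else (st.1, st.2 ++ [line])) (segs, cur)).1
        ++ [(ls.foldl (fun (st : List (List (List Char)) × List (List Char)) line =>
          if PySem.Chars.startswith (PySem.Chars.strip line) ['`', '`', '`'] then (st.1 ++ [st.2], [])
          else (st.1, st.2 ++ [line])) (segs, cur)).2])
      = pvSumEvens (segs ++ [cur]) + pvACount ls (decide (segs.length % 2 = 1)) := by
  induction ls with
  | nil => intro segs cur; simp [pvACount]
  | cons l ls ih =>
      intro segs cur
      by_cases hf : PySem.Chars.startswith (PySem.Chars.strip l) ['`', '`', '`'] = true
      · simp only [List.foldl_cons, hf, if_pos]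
        rw [ih (segs ++ [cur]) []]
        rw [pvSumEvens_append_singleton (segs ++ [cur]) []]
        have hlen : (segs ++ [cur]).length = segs.length + 1 := by simp
        simp only [pvACount, hf, ite_true, hlen]
        have hb : (!decide (segs.length % 2 = 1)) = decide ((segs.length + 1) % 2 = 1) := by
          by_cases h : segs.length % 2 = 1
          · have h0 : ¬ (segs.length + 1) % 2 = 1 := by omega
            simp [h, h0]
          · have h0 : (segs.length + 1) % 2 = 1 := by omega
            simp [h, h0]
        rw [hb]
        have hz : pvSegCount [] = 0 := by simp [pvSegCount]
        split_ifs <;> simp [hz]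
      · simp only [List.foldl_cons, hf, Bool.false_eq_true, ite_false]
        rw [ih segs (cur ++ [l])]
        rw [pvSumEvens_append_singleton segs (cur ++ [l]),
            pvSumEvens_append_singleton segs cur]
        have hseg : pvSegCount (cur ++ [l])
            = pvSegCount cur + (if PySem.Chars.strip l == ['$', '$'] then 1 else 0) := by
          simp only [pvSegCount, List.filter_append, List.length_append]
          split_ifs with h <;> simp [h]
        by_cases hp : segs.length % 2 = 0
        · have h1 : ¬ (segs.length % 2 = 1) := by omega
          simp [pvACount, hf, hseg, hp]
          split_ifs <;> ring
        · have h1 : segs.length % 2 = 1 := by omega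
          simp [pvACount, hf, h1]

-- ===== VERDICT (by name: the statement is the Claim_ definition above) =====
theorem count_latex_display_spec : Claim_equal_count_latex_display := by
  intro content _
  unfold Spec_count_latex_display count_latex_display count_latex_display_alt
  rw [pvAfold_eq]
  rw [pvMain (PySem.Chars.splitOn content.toList ['\n']) [] []]
  simp [pvSumEvens]
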